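-- pv_equiv track=rewrite | github.com/mh70cz/mypy | challenges/pybites/bite_179.py | _no_non_white_before
-- ===== SOURCE A (Python) =====
-- from string import whitespace
--
-- def _no_non_white_before(txt):
--     try:
--         last_nl_idx = txt.rindex("\n")
--     except ValueError:
--         last_nl_idx = -1
--     if len(txt) == last_nl_idx + 1:
--         return True
--     chunk = txt[last_nl_idx + 1:]
--     return all([c in whitespace for c in chunk])
-- ===== SOURCE B (Python) =====
-- from string import whitespace
--
-- def _no_non_white_before(txt):
--     # One backward pass: the first newline seen from the end means everything
--     # after the last newline was whitespace; a non-whitespace char means not.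
--     for c in reversed(txt):
--         if c == "\n":
--             return True
--         if c not in whitespace:
--             return False
--     return True
-- ===== Notes on version B (the rewrite author's own statement) =====
-- stated objective: simpler
-- what changed: Replaces the two-phase locate-last-newline-then-slice-and-check-all with a single backward scan that returns at the first newline (True) or first non-whitespace character (False), so it touches only the tail of the string instead of scanning it all and materialising a comprehension list.
import Mathlib
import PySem

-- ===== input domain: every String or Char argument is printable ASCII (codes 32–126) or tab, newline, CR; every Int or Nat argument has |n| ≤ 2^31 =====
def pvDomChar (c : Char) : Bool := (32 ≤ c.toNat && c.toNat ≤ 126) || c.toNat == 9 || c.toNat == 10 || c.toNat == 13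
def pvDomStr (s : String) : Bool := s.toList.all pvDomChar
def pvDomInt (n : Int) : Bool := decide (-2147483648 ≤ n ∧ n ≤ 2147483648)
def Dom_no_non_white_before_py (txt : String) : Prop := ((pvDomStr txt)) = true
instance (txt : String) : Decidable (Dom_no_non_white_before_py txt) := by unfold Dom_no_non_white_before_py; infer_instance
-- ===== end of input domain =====

-- B replaces A's locate-last-newline-then-slice-and-check with a single backward scan; objective: simpler.
-- ===== PORT A =====
-- string.whitespace = " \t\n\r\x0b\x0c" (membership of a single char in it = list membership)
def pyWhitespace : List Char := [' ', '\t', '\n', '\r', Char.ofNat 11, Char.ofNat 12]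

def no_non_white_before_py (txt : String) : Bool :=
  -- try txt.rindex("\n") except ValueError: -1  ==  txt.rfind("\n") (same index, -1 when absent)
  let last_nl_idx : Int := PySem.Str.rfind txt "\n"
  if PySem.Str.len txt = last_nl_idx + 1 then true
  else
    let chunk := PySem.Str.slice txt (some (last_nl_idx + 1)) none
    ((chunk.toList.map (fun c => decide (c ∈ pyWhitespace))).all (fun b => b))

-- ===== PORT B =====
-- for c in reversed(txt): first "\n" -> True, first non-whitespace -> False; loop exhausted -> True
def pvAltGo : List Char → Bool
  | [] => true
  | c :: rest =>
    if c = '\n' then true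
    else if c ∈ pyWhitespace then pvAltGo rest
    else false

def no_non_white_before_py_alt (txt : String) : Bool :=
  pvAltGo txt.toList.reverse

-- ===== PRECONDITION & SPEC =====
def Spec_no_non_white_before_py (txt : String) (out : Bool) : Prop := out = no_non_white_before_py_alt txt
instance (txt : String) (out : Bool) : Decidable (Spec_no_non_white_before_py txt out) := by unfold Spec_no_non_white_before_py; infer_instance

-- ===== CLAIM (what is proved, stated in full; the proofs are below) =====
def Claim_equal_no_non_white_before_py : Prop := ∀ (txt : String), Dom_no_non_white_before_py txt → Spec_no_non_white_before_py txt (no_non_white_before_py txt)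

-- ===== LEMMAS AND PROOFS =====

theorem pv_go_le (s sub : List Char) (k : Nat) :
    PySem.Chars.rfind.go s sub k ≤ (k : Int) := by
  induction k with
  | zero => simp [PySem.Chars.rfind.go]; split <;> simp
  | succ j ih =>
    simp [PySem.Chars.rfind.go]
    split
    · simp
    · exact le_trans ih (by omega)

theorem pv_go_ge (s sub : List Char) (k : Nat) :
    (-1 : Int) ≤ PySem.Chars.rfind.go s sub k := by
  induction k with
  | zero => simp [PySem.Chars.rfind.go]; split <;> simp
  | succ j ih =>
    simp [PySem.Chars.rfind.go]
    split
    · omega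
    · exact ih

theorem pv_go_append (xs : List Char) (c : Char) (k : Nat) (hk : k < xs.length) :
    PySem.Chars.rfind.go (xs ++ [c]) ['\n'] k = PySem.Chars.rfind.go xs ['\n'] k := by
  induction k with
  | zero =>
    simp only [PySem.Chars.rfind.go]
    cases xs with
    | nil => simp at hk
    | cons a as => simp [List.isPrefixOf]
  | succ j ih =>
    simp only [PySem.Chars.rfind.go]
    have hd : List.drop (j + 1) (xs ++ [c]) = List.drop (j + 1) xs ++ [c] :=
      List.drop_append_of_le_length (by omega)
    rw [hd]
    have hne : List.drop (j + 1) xs ≠ [] := by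
      intro h
      have := List.drop_eq_nil_iff.mp h
      omega
    obtain ⟨a, as, ha⟩ := List.exists_cons_of_ne_nil hne
    rw [ha]
    simp only [List.cons_append, List.isPrefixOf]
    by_cases hac : ('\n' == a) = true
    · simp [hac]
    · simp at hac
      simp [hac]
      exact ih (by omega)

theorem pv_rfind_lt (xs : List Char) :
    PySem.Chars.rfind xs ['\n'] < (xs.length : Int) := by
  cases xs with
  | nil => simp [PySem.Chars.rfind, PySem.Chars.rfind.go, List.isPrefixOf]
  | cons a as =>
    show PySem.Chars.rfind.go (a :: as) ['\n'] (as.length + 1) < _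
    simp only [PySem.Chars.rfind.go]
    have : List.drop (as.length + 1) (a :: as) = [] := by simp
    rw [this]
    rw [show List.isPrefixOf ['\n'] ([] : List Char) = false from rfl]
    simp only [Bool.false_eq_true, if_false]
    have := pv_go_le (a :: as) ['\n'] as.length
    simp only [List.length_cons]
    push_cast
    omega

theorem pv_go_zero (s sub : List Char) :
    PySem.Chars.rfind.go s sub 0 = if sub.isPrefixOf s then 0 else -1 := by
  simp [PySem.Chars.rfind.go]

theorem pv_go_succ (s sub : List Char) (j : Nat) :
    PySem.Chars.rfind.go s sub (j + 1) =
      if sub.isPrefixOf (List.drop (j + 1) s) then ((j + 1 : Nat) : Int)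
      else PySem.Chars.rfind.go s sub j := by
  simp [PySem.Chars.rfind.go]

theorem pv_rfind_snoc (xs : List Char) (c : Char) :
    PySem.Chars.rfind (xs ++ [c]) ['\n'] =
      if c = '\n' then (xs.length : Int) else PySem.Chars.rfind xs ['\n'] := by
  cases xs with
  | nil =>
    by_cases hc : c = '\n'
    · subst hc; decide
    · rw [if_neg hc]
      show PySem.Chars.rfind.go [c] ['\n'] 1 = _
      rw [pv_go_succ]
      rw [show List.drop 1 [c] = ([] : List Char) from rfl]
      rw [show List.isPrefixOf ['\n'] ([] : List Char) = false from rfl]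
      simp only [Bool.false_eq_true, if_false]
      have hp : List.isPrefixOf ['\n'] [c] = false := by
        simp [List.isPrefixOf]
        exact fun h => hc h.symm
      rw [pv_go_zero, hp]
      simp [PySem.Chars.rfind, pv_go_zero]
  | cons a as =>
    unfold PySem.Chars.rfind
    rw [show ((a :: as) ++ [c]).length = as.length + 1 + 1 by simp]
    rw [pv_go_succ]
    rw [show List.drop (as.length + 1 + 1) ((a :: as) ++ [c]) = ([] : List Char) by
      simp]
    rw [show List.isPrefixOf ['\n'] ([] : List Char) = false from rfl]
    simp only [Bool.false_eq_true, if_false]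
    rw [pv_go_succ]
    have hd : List.drop (as.length + 1) ((a :: as) ++ [c]) = [c] := by
      rw [List.drop_append_of_le_length (by simp)]
      simp
    rw [hd]
    have hrhs : PySem.Chars.rfind.go (a :: as) ['\n'] (a :: as).length = PySem.Chars.rfind.go (a :: as) ['\n'] as.length := by
      rw [show (a :: as).length = as.length + 1 from rfl]
      rw [pv_go_succ]
      rw [show List.drop (as.length + 1) (a :: as) = ([] : List Char) by simp]
      rw [show List.isPrefixOf ['\n'] ([] : List Char) = false from rfl]
      simp
    rw [hrhs]
    by_cases hc : c = '\n'
    · subst hc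
      simp [List.isPrefixOf]
    · have : List.isPrefixOf ['\n'] [c] = false := by
        simp [List.isPrefixOf]
        exact fun h => hc h.symm
      rw [this]
      simp only [Bool.false_eq_true, if_false, if_neg hc]
      exact pv_go_append (a :: as) c as.length (by simp)

-- A equals its slice-free core
def pvAcore (l : List Char) : Bool :=
  ((l.drop (PySem.Chars.rfind l ['\n'] + 1).toNat).map (fun c => decide (c ∈ pyWhitespace))).all (fun b => b)

theorem pv_A_eq_core (txt : String) : no_non_white_before_py txt = pvAcore txt.toList := by
  unfold no_non_white_before_py pvAcore
  have hrw : PySem.Str.rfind txt "\n" = PySem.Chars.rfind txt.toList ['\n'] := by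
    rw [PySem.Str.rfind_eq]
    simp
  rw [hrw]
  have hge := pv_go_ge txt.toList ['\n'] txt.toList.length
  have hr : (-1 : Int) ≤ PySem.Chars.rfind txt.toList ['\n'] := hge
  show (if PySem.Str.len txt = PySem.Chars.rfind txt.toList ['\n'] + 1 then true
    else ((List.map (fun c => decide (c ∈ pyWhitespace))
      (PySem.Str.slice txt (some (PySem.Chars.rfind txt.toList ['\n'] + 1)) none).toList).all
      (fun b => b))) = _
  split
  · rename_i h
    have hlen : (PySem.Chars.rfind txt.toList ['\n'] + 1).toNat = txt.toList.length := by
      unfold PySem.Str.len at h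
      omega
    rw [hlen, List.drop_length]
    rfl
  · have hchunk : (PySem.Str.slice txt (some (PySem.Chars.rfind txt.toList ['\n'] + 1)) none).toList
        = List.drop (PySem.Chars.rfind txt.toList ['\n'] + 1).toNat txt.toList := by
      rw [PySem.Str.toList_slice, PySem.Chars.slice_eq_listSlice,
        PySem.List.slice_from _ (by omega)]
    rw [hchunk]

theorem pv_core_eq_alt (l : List Char) : pvAcore l = pvAltGo l.reverse := by
  induction l using List.reverseRecOn with
  | nil => rfl
  | append_singleton xs c ih =>
    rw [List.reverse_append]
    unfold pvAcore
    rw [pv_rfind_snoc]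
    by_cases hc : c = '\n'
    · subst hc
      rw [if_pos rfl]
      have : ((xs.length : Int) + 1).toNat = (xs ++ ['\n']).length := by simp
      rw [this, List.drop_length]
      rfl
    · rw [if_neg hc]
      have hge := pv_go_ge xs ['\n'] xs.length
      have hlt := pv_rfind_lt xs
      have hle : (PySem.Chars.rfind xs ['\n'] + 1).toNat ≤ xs.length := by omega
      rw [List.drop_append_of_le_length hle]
      simp only [List.map_append, List.all_append, List.reverse_cons]
      show _ = pvAltGo (c :: xs.reverse)
      unfold pvAltGo
      rw [if_neg hc]
      by_cases hw : c ∈ pyWhitespace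
      · rw [if_pos hw, ← ih]
        unfold pvAcore
        simp [hw, Bool.and_comm]
      · rw [if_neg hw]
        simp [hw]

-- ===== VERDICT (by name: the statement is the Claim_ definition above) =====
theorem no_non_white_before_py_spec : Claim_equal_no_non_white_before_py := by
  intro txt _
  unfold Spec_no_non_white_before_py no_non_white_before_py_alt
  rw [pv_A_eq_core, pv_core_eq_alt]
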